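-- pv_equiv track=rewrite | github.com/dev-scof/Algorithm | 아카이브/programmers_algorithm/python/LEVEL_1/대충 만든 자판.py | solution
-- ===== SOURCE A (Python) =====
-- def solution(keymap, targets):
--     count={}
--     all_keys=''.join(keymap)
--     for k in set(all_keys):
--         for key in keymap:
--             if k in key:
--                 if k not in count:
--                     count[k]=key.index(k)
--                 else:
--                     count[k]=min(count[k], key.index(k))
--
--     answer = []
--     for target in targets:
--         cnt=0
--         flag=True
--         for k in target:
--             if k not in count:
--                 flag=False
--                 break
--             cnt+=count[k]+1
--
--         if flag:
--             answer.append(cnt)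
--         else:
--             answer.append(-1)
--
--     return answer
-- ===== SOURCE B (Python) =====
-- def solution(keymap, targets):
--     # position-major sweep: walk columns 0..width-1; the FIRST time a character is
--     # seen wins, so the table holds each character's minimum key index without min()
--     best = {}
--     width = max(map(len, keymap), default=0)
--     for i in range(width):
--         for key in keymap:
--             if i < len(key) and key[i] not in best:
--                 best[key[i]] = i
--
--     answer = []
--     for t in targets:
--         vals = [best.get(ch) for ch in t]
--         answer.append(-1 if None in vals else sum(vals) + len(t))
--     return answer
-- ===== Notes on version B (the rewrite author's own statement) =====
-- stated objective: alternative
-- what changed: The table is built by a position-major sweep over columns 0..max(len)-1 where the first write wins (no min(), no '.index', no membership scans of keys), instead of A's character-major loops that rescan every key with 'in'/'.index' and take running minima; scoring gathers all lookups into a list and sums it instead of A's break-flag loop.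
import Mathlib
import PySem

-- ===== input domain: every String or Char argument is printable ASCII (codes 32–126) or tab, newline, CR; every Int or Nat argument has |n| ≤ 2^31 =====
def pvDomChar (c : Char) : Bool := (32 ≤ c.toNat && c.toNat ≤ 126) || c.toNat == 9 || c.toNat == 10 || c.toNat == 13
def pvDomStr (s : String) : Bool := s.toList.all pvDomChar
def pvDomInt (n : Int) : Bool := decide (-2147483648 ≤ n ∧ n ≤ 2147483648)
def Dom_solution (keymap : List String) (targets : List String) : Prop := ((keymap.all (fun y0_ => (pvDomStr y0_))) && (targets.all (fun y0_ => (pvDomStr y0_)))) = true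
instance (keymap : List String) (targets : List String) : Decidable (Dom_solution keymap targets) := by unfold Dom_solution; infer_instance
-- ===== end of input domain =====

-- B replaces A's character-major build (rescanning each key with 'in'/'.index' and running min)
-- by a position-major first-write-wins sweep over columns, and the break-flag target loop by a
-- gather-then-sum over the lookups; return values agree everywhere.

-- ===== PORT A =====
-- body of A's inner 'for key in keymap' loop (for a fixed distinct char k)
def aInner (k : Char) (count : PySem.Dict Char Int) (key : String) : PySem.Dict Char Int :=
  if k ∈ key.toList then
    match count.get? k with
    | none => count.insert k (((PySem.List.index? key.toList k).getD 0 : Nat) : Int)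
    | some v => count.insert k (min v (((PySem.List.index? key.toList k).getD 0 : Nat) : Int))
  else count

-- inner target loop of A: returns (cnt, flag); 'break' = returning flag false
def aScan (count : PySem.Dict Char Int) : List Char → Int → Int × Bool
  | [], cnt => (cnt, true)
  | k :: rest, cnt =>
    match count.get? k with
    | none => (cnt, false)
    | some v => aScan count rest (cnt + (v + 1))

def solution (keymap : List String) (targets : List String) : List Int :=
  let allKeys : List Char := keymap.foldl (fun a s => a ++ s.toList) []
  let count : PySem.Dict Char Int :=
    (PySem.Set.ofList allKeys).foldl (fun count k => keymap.foldl (aInner k) count)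
      PySem.Dict.empty
  targets.foldl
    (fun answer target =>
      let r := aScan count target.toList 0
      if r.2 then answer ++ [r.1] else answer ++ [(-1 : Int)])
    []

-- ===== PORT B =====
-- body of B's 'for key in keymap' loop at column i: 'if i < len(key) and key[i] not in best'
-- (key[i] is ported by pyGet?; the .getD is only reached with 0 ≤ i < len(key), where pyGet? is some)
def bCol (keymap : List String) (best : PySem.Dict Char Int) (i : Int) : PySem.Dict Char Int :=
  keymap.foldl
    (fun best key =>
      if i < (key.toList.length : Int) then
        let c := (PySem.List.pyGet? key.toList i).getD ' '
        if (best.get? c).isSome then best else best.insert c i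
      else best)
    best

def solution_alt (keymap : List String) (targets : List String) : List Int :=
  let width : Int := PySem.List.maxD (keymap.map (fun k => (k.toList.length : Int))) (fun x => x) 0
  let best : PySem.Dict Char Int :=
    (PySem.List.pyRange 0 width 1).foldl (bCol keymap) PySem.Dict.empty
  targets.foldl
    (fun answer t =>
      let vals : List (Option Int) := t.toList.map (fun ch => best.get? ch)
      -- sum(vals) is only taken when vals has no None, where .getD 0 is exact
      answer ++ [if none ∈ vals then (-1 : Int)
                 else vals.foldl (fun a v => a + v.getD 0) 0 + (t.toList.length : Int)])
    []

-- ===== PRECONDITION & SPEC =====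
def Spec_solution (keymap : List String) (targets : List String) (out : List Int) : Prop := out = solution_alt keymap targets
instance (keymap : List String) (targets : List String) (out : List Int) : Decidable (Spec_solution keymap targets out) := by unfold Spec_solution; infer_instance

-- ===== CLAIM (what is proved, stated in full; the proofs are below) =====
def Claim_equal_solution : Prop := ∀ (keymap : List String) (targets : List String), Dom_solution keymap targets → Spec_solution keymap targets (solution keymap targets)

-- ===== LEMMAS AND PROOFS =====

-- option-valued min
def omin : Option Int → Option Int → Option Int
  | none, b => b
  | some a, none => some a
  | some a, some b => some (min a b)

-- common specification: minimum first index of k over the keys that contain it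
def mIdx : List String → Char → Option Int
  | [], _ => none
  | key :: rest, k =>
    omin ((PySem.List.index? key.toList k).map (fun n : Nat => (n : Int))) (mIdx rest k)

-- does column i of some key hold ch?
def colHas (keymap : List String) (i : Int) (ch : Char) : Bool :=
  keymap.any (fun key => PySem.List.pyGet? key.toList i == some ch)

theorem omin_none_right (a : Option Int) : omin a none = a := by cases a <;> rfl

theorem omin_assoc (a b c : Option Int) : omin (omin a b) c = omin a (omin b c) := by
  cases a <;> cases b <;> cases c <;> simp [omin, min_assoc]

-- ============ A's dict equals mIdx ============

theorem aInner_get?_self (keymap : List String) (d : PySem.Dict Char Int) (k : Char) :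
    (keymap.foldl (aInner k) d).get? k = omin (d.get? k) (mIdx keymap k) := by
  induction keymap generalizing d with
  | nil => simp [mIdx, omin_none_right]
  | cons key rest ih =>
    simp only [List.foldl_cons]
    rw [ih, mIdx, ← omin_assoc]
    congr 1
    unfold aInner
    by_cases hmem : k ∈ key.toList
    · obtain ⟨i, hi⟩ : ∃ i, PySem.List.index? key.toList k = some i := by
        cases h : PySem.List.index? key.toList k with
        | none => exact absurd ((PySem.List.index?_eq_none_iff _ _).mp h) (by simpa using hmem)
        | some i => exact ⟨i, rfl⟩
      rw [if_pos hmem, hi]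
      cases hv : d.get? k with
      | none => simp [omin, PySem.Dict.get?_insert_self]
      | some v => simp [omin, PySem.Dict.get?_insert_self]
    · rw [if_neg hmem]
      have hn : PySem.List.index? key.toList k = none := (PySem.List.index?_eq_none_iff _ _).mpr hmem
      rw [hn]
      cases d.get? k <;> simp [omin]

theorem aInner_get?_other (keymap : List String) (d : PySem.Dict Char Int) (k ch : Char)
    (h : ch ≠ k) : (keymap.foldl (aInner k) d).get? ch = d.get? ch := by
  induction keymap generalizing d with
  | nil => rfl
  | cons key rest ih =>
    simp only [List.foldl_cons]
    rw [ih]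
    unfold aInner
    by_cases hmem : k ∈ key.toList
    · rw [if_pos hmem]
      cases d.get? k <;> (rw [PySem.Dict.get?_insert]; simp [h])
    · rw [if_neg hmem]

theorem aBuild_get? (keymap : List String) (ks : List Char) (hnd : ks.Nodup)
    (d : PySem.Dict Char Int) (ch : Char) :
    (ks.foldl (fun count k => keymap.foldl (aInner k) count) d).get? ch
      = if ch ∈ ks then omin (d.get? ch) (mIdx keymap ch) else d.get? ch := by
  induction ks generalizing d with
  | nil => simp
  | cons k rest ih =>
    simp only [List.foldl_cons]
    rw [ih (List.Nodup.of_cons hnd)]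
    by_cases hk : ch = k
    · subst hk
      have hnot : ch ∉ rest := (List.nodup_cons.mp hnd).1
      rw [if_neg hnot, aInner_get?_self, if_pos (List.mem_cons_self)]
    · rw [aInner_get?_other _ _ _ _ hk]
      simp [List.mem_cons, hk]

theorem mIdx_eq_none (keymap : List String) (ch : Char)
    (h : ∀ key ∈ keymap, ch ∉ key.toList) : mIdx keymap ch = none := by
  induction keymap with
  | nil => rfl
  | cons key rest ih =>
    rw [mIdx, (PySem.List.index?_eq_none_iff _ _).mpr (h key List.mem_cons_self),
      ih (fun k hk => h k (List.mem_cons_of_mem _ hk))]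
    rfl

-- A's dict, as a lookup table, is exactly mIdx
theorem aDict_get? (keymap : List String) (ch : Char) :
    ((PySem.Set.ofList (keymap.foldl (fun a s => a ++ s.toList) [])).foldl
        (fun count k => keymap.foldl (aInner k) count) PySem.Dict.empty).get? ch
      = mIdx keymap ch := by
  rw [aBuild_get? _ _ (PySem.Set.nodup_ofList _), PySem.Dict.get?_empty]
  by_cases hmem : ch ∈ PySem.Set.ofList (keymap.foldl (fun a s => a ++ s.toList) [])
  · rw [if_pos hmem]; rfl
  · rw [if_neg hmem]
    rw [PySem.Set.mem_ofList, PySem.List.foldl_append_eq_flatMap] at hmem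
    simp only [List.nil_append, List.mem_flatMap] at hmem
    push Not at hmem
    rw [mIdx_eq_none _ _ hmem]

-- ============ facts linking mIdx and column occupancy ============

-- the minimum is attained: mIdx = some m yields a key whose first index of ch is m
theorem mIdx_attained (keymap : List String) (ch : Char) (m : Int)
    (h : mIdx keymap ch = some m) :
    ∃ key ∈ keymap, ∃ n : Nat, (n : Int) = m ∧ PySem.List.index? key.toList ch = some n := by
  induction keymap generalizing m with
  | nil => exact absurd h (by simp [mIdx])
  | cons key rest ih =>
    rw [mIdx] at h
    cases hk : PySem.List.index? key.toList ch with
    | none =>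
      rw [hk] at h; simp only [Option.map_none] at h
      obtain ⟨k', hk', n, hn, hidx⟩ := ih _ (by simpa [omin] using h)
      exact ⟨k', List.mem_cons_of_mem _ hk', n, hn, hidx⟩
    | some n =>
      rw [hk] at h; simp only [Option.map_some] at h
      cases hr : mIdx rest ch with
      | none =>
        rw [hr] at h; simp only [omin] at h
        exact ⟨key, List.mem_cons_self, n, by injection h, hk⟩
      | some m' =>
        rw [hr] at h; simp only [omin] at h
        have hm : min (n : Int) m' = m := by injection h
        by_cases hle : (n : Int) ≤ m'
        · exact ⟨key, List.mem_cons_self, n, by rw [← hm, min_eq_left hle], hk⟩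
        · obtain ⟨k', hk', n', hn', hidx⟩ := ih _ hr
          exact ⟨k', List.mem_cons_of_mem _ hk', n', by rw [hn', ← hm, min_eq_right (le_of_not_ge hle)], hidx⟩

-- mIdx is a lower bound for the first index in any member key
theorem mIdx_le (keymap : List String) (ch : Char) (key : String) (n : Nat)
    (hmem : key ∈ keymap) (hidx : PySem.List.index? key.toList ch = some n) :
    ∃ m, mIdx keymap ch = some m ∧ m ≤ (n : Int) := by
  induction keymap with
  | nil => cases hmem
  | cons k rest ih =>
    rw [mIdx]
    rcases List.mem_cons.mp hmem with rfl | hmem'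
    · rw [hidx]
      cases hr : mIdx rest ch with
      | none => exact ⟨n, rfl, le_refl _⟩
      | some m' => exact ⟨min (n : Int) m', rfl, min_le_left _ _⟩
    · obtain ⟨m, hm, hle⟩ := ih hmem'
      rw [hm]
      cases hk : (PySem.List.index? k.toList ch).map (fun n : Nat => (n : Int)) with
      | none => exact ⟨m, rfl, hle⟩
      | some v => exact ⟨min v m, rfl, le_trans (min_le_right _ _) hle⟩

-- a char occupying column i somewhere has mIdx ≤ i
theorem colHas_mIdx_le (keymap : List String) (i : Int) (ch : Char) (hi : 0 ≤ i)
    (h : colHas keymap i ch = true) : ∃ m, mIdx keymap ch = some m ∧ m ≤ i := by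
  simp only [colHas, List.any_eq_true, beq_iff_eq] at h
  obtain ⟨key, hkey, hget⟩ := h
  rw [PySem.List.pyGet?_of_nonneg _ hi] at hget
  obtain ⟨hlt, hgetE⟩ := List.getElem?_eq_some_iff.mp hget
  have hmem : ch ∈ key.toList := hgetE ▸ List.getElem_mem hlt
  obtain ⟨n, hn⟩ := Option.isSome_iff_exists.mp ((PySem.List.index?_isSome_iff _ _).mpr hmem)
  obtain ⟨hk, hkv, hfirst⟩ := PySem.List.getElem_of_index?_eq_some hn
  have hle : n ≤ i.toNat := by
    by_contra hgt
    exact hfirst i.toNat (by omega) hgetE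
  obtain ⟨m, hm, hle'⟩ := mIdx_le keymap ch key n hkey hn
  exact ⟨m, hm, by omega⟩

-- the column at mIdx is occupied
theorem mIdx_colHas (keymap : List String) (ch : Char) (m : Int)
    (h : mIdx keymap ch = some m) : colHas keymap m ch = true := by
  obtain ⟨key, hkey, n, hn, hidx⟩ := mIdx_attained keymap ch m h
  obtain ⟨hk, hkv, _⟩ := PySem.List.getElem_of_index?_eq_some hidx
  simp only [colHas, List.any_eq_true]
  refine ⟨key, hkey, ?_⟩
  rw [← hn, PySem.List.pyGet?_natCast, List.getElem?_eq_getElem hk, hkv]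
  simp

theorem mIdx_nonneg (keymap : List String) (ch : Char) (m : Int)
    (h : mIdx keymap ch = some m) : 0 ≤ m := by
  obtain ⟨_, _, n, hn, _⟩ := mIdx_attained keymap ch m h
  omega

-- ============ B's sweep equals mIdx ============

-- one column of B's sweep
theorem bCol_get? (keymap : List String) (d : PySem.Dict Char Int) (i : Int) (ch : Char)
    (hi : 0 ≤ i) :
    (bCol keymap d i).get? ch
      = if (d.get? ch).isSome then d.get? ch
        else if colHas keymap i ch then some i else none := by
  unfold bCol
  induction keymap generalizing d with
  | nil =>
    simp only [List.foldl_nil, colHas, List.any_nil]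
    cases h : d.get? ch <;> simp
  | cons key rest ih =>
    simp only [List.foldl_cons]
    have hcol : colHas (key :: rest) i ch
        = ((PySem.List.pyGet? key.toList i == some ch) || colHas rest i ch) := by
      simp [colHas]
    by_cases hlen : i < (key.toList.length : Int)
    · rw [if_pos hlen]
      have hget : PySem.List.pyGet? key.toList i = some key.toList[i.toNat] := by
        rw [PySem.List.pyGet?_of_nonneg _ hi]
        exact List.getElem?_eq_getElem (by omega)
      set c := (PySem.List.pyGet? key.toList i).getD ' ' with hc
      have hceq : c = key.toList[i.toNat] := by rw [hc, hget]; rfl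
      by_cases hch : c = ch
      · -- this key writes ch at column i (if absent)
        subst hch
        have hcolT : (PySem.List.pyGet? key.toList i == some c) = true := by
          rw [hget, hceq]; simp
        rw [hcol, hcolT, Bool.true_or]
        by_cases hd : (d.get? c).isSome
        · rw [if_pos hd, ih d]
          simp [hd]
        · rw [if_neg hd, ih]
          have : ((d.insert c i).get? c).isSome := by
            rw [PySem.Dict.get?_insert_self]; rfl
          rw [if_pos this, PySem.Dict.get?_insert_self]
          simp only [Bool.not_eq_true, Option.isSome_eq_false_iff, Option.isNone_iff_eq_none] at hd
          simp [hd]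
      · -- c ≠ ch: ch's entry is untouched by this key
        have hcolF : (PySem.List.pyGet? key.toList i == some ch) = false := by
          rw [hget, ← hceq]; simpa using hch
        rw [hcol, hcolF, Bool.false_or]
        by_cases hd : (d.get? c).isSome
        · rw [if_pos hd, ih d]
        · rw [if_neg hd, ih, PySem.Dict.get?_insert]
          simp [Ne.symm hch]
    · rw [if_neg hlen, ih d]
      have hcolF : (PySem.List.pyGet? key.toList i == some ch) = false := by
        have : PySem.List.pyGet? key.toList i = none := by
          rw [PySem.List.pyGet?_of_nonneg _ hi]
          exact List.getElem?_eq_none (by omega)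
        simp [this]
      rw [hcol, hcolF, Bool.false_or]

-- the sweep over columns 0..n-1 holds mIdx, filtered to entries below n
theorem sweep_get? (keymap : List String) (n : Nat) (ch : Char) :
    ((PySem.List.pyRange 0 (n : Int) 1).foldl (bCol keymap) PySem.Dict.empty).get? ch
      = match mIdx keymap ch with
        | some m => if m < (n : Int) then some m else none
        | none => none := by
  induction n with
  | zero =>
    rw [PySem.List.pyRange_one_eq_nil (by norm_num)]
    simp only [List.foldl_nil, PySem.Dict.get?_empty]
    cases h : mIdx keymap ch with
    | none => rfl
    | some m =>
      have h0 := mIdx_nonneg keymap ch m h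
      simp only [Nat.cast_zero]
      rw [if_neg (by omega)]
  | succ n ih =>
    have hcast : ((n + 1 : Nat) : Int) = (n : Int) + 1 := by push_cast; ring
    rw [hcast, PySem.List.pyRange_one_succ_right (by positivity), List.foldl_append,
      List.foldl_cons, List.foldl_nil, bCol_get? _ _ _ _ (by positivity), ih]
    cases h : mIdx keymap ch with
    | some m =>
      by_cases hm : m < (n : Int)
      · simp only [if_pos hm, Option.isSome_some, if_true]
        rw [if_pos (show m < (n : Int) + 1 by omega)]
      · simp only [if_neg hm, Option.isSome_none, Bool.false_eq_true, if_false]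
        by_cases hmn : m = (n : Int)
        · subst hmn
          rw [if_pos (mIdx_colHas keymap ch _ h), if_pos (by omega)]
        · have hcol : colHas keymap (n : Int) ch = false := by
            by_contra hc
            obtain ⟨m', hm', hle⟩ := colHas_mIdx_le keymap (n : Int) ch (by positivity)
              (by simpa using hc)
            rw [h] at hm'; injection hm' with hm''
            omega
          simp only [hcol, Bool.false_eq_true, if_false]
          rw [if_neg (by omega)]
    | none =>
      simp only [Option.isSome_none, Bool.false_eq_true, if_false]
      have hcol : colHas keymap (n : Int) ch = false := by
        by_contra hc
        obtain ⟨m', hm', _⟩ := colHas_mIdx_le keymap (n : Int) ch (by positivity) (by simpa using hc)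
        rw [h] at hm'; cases hm'
      simp [hcol]

-- every key's length is bounded by B's width
theorem len_le_width (keymap : List String) (key : String) (h : key ∈ keymap) :
    (key.toList.length : Int)
      ≤ PySem.List.maxD (keymap.map (fun k => (k.toList.length : Int))) (fun x => x) 0 := by
  cases keymap with
  | nil => cases h
  | cons k rest =>
    exact PySem.List.le_key_maxD _ (fun x => x) _ (by simp) _ (List.mem_map_of_mem h)

theorem width_nonneg (keymap : List String) :
    0 ≤ PySem.List.maxD (keymap.map (fun k => (k.toList.length : Int))) (fun x => x) 0 := by
  cases keymap with
  | nil => simp [PySem.List.maxD_nil]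
  | cons key rest =>
    exact le_trans (by positivity) (len_le_width (key :: rest) key List.mem_cons_self)

-- mIdx entries lie below the width
theorem mIdx_lt_width (keymap : List String) (ch : Char) (m : Int)
    (h : mIdx keymap ch = some m) :
    m < PySem.List.maxD (keymap.map (fun k => (k.toList.length : Int))) (fun x => x) 0 := by
  obtain ⟨key, hkey, n, hn, hidx⟩ := mIdx_attained keymap ch m h
  obtain ⟨hk, _, _⟩ := PySem.List.getElem_of_index?_eq_some hidx
  have := len_le_width keymap key hkey
  omega

-- B's dict, as a lookup table, is also exactly mIdx
theorem bDict_get? (keymap : List String) (ch : Char) :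
    ((PySem.List.pyRange 0
          (PySem.List.maxD (keymap.map (fun k => (k.toList.length : Int))) (fun x => x) 0) 1).foldl
        (bCol keymap) PySem.Dict.empty).get? ch = mIdx keymap ch := by
  set w := PySem.List.maxD (keymap.map (fun k => (k.toList.length : Int))) (fun x => x) 0 with hw
  have h0 : 0 ≤ w := width_nonneg keymap
  have hcast : ((w.toNat : Nat) : Int) = w := by omega
  rw [← hcast, sweep_get?]
  cases h : mIdx keymap ch with
  | none => rfl
  | some m =>
    have := mIdx_lt_width keymap ch m h
    rw [← hw] at this
    simp only
    rw [if_pos (by omega)]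

-- ============ scoring ============

theorem aScan_break (c : PySem.Dict Char Int) (cs : List Char) (cnt : Int)
    (h : none ∈ cs.map (fun ch => c.get? ch)) : (aScan c cs cnt).2 = false := by
  induction cs generalizing cnt with
  | nil => simp at h
  | cons ch rest ih =>
    rw [aScan]
    cases hv : c.get? ch with
    | none => rfl
    | some v =>
      simp only [List.map_cons, List.mem_cons, hv] at h
      exact ih _ (h.resolve_left (by simp))

theorem foldl_add_shift (l : List (Option Int)) (s : Int) :
    l.foldl (fun a v => a + v.getD 0) s = s + l.foldl (fun a v => a + v.getD 0) 0 := by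
  induction l generalizing s with
  | nil => simp
  | cons v rest ih =>
    simp only [List.foldl_cons, zero_add]
    rw [ih, ih (v.getD 0)]
    ring

theorem aScan_sum (c : PySem.Dict Char Int) (cs : List Char) (cnt : Int)
    (h : none ∉ cs.map (fun ch => c.get? ch)) :
    aScan c cs cnt
      = (cnt + (cs.map (fun ch => c.get? ch)).foldl (fun a v => a + v.getD 0) 0
           + (cs.length : Int), true) := by
  induction cs generalizing cnt with
  | nil => simp [aScan]
  | cons ch rest ih =>
    simp only [List.map_cons, List.mem_cons] at h
    push Not at h
    cases hv : c.get? ch with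
    | none => exact absurd hv.symm h.1
    | some v =>
      simp only [aScan, hv, ih _ h.2]
      simp only [List.map_cons, List.foldl_cons, List.length_cons, hv, zero_add]
      rw [foldl_add_shift _ (Option.getD (some v) 0)]
      simp only [Option.getD_some]
      rw [Prod.mk.injEq]
      refine ⟨by push_cast; ring, rfl⟩

-- per-target: A's break-flag scan equals B's gather-then-sum
theorem score_eq (c b : PySem.Dict Char Int) (h : ∀ k, c.get? k = b.get? k) (cs : List Char) :
    (if (aScan c cs 0).2 then (aScan c cs 0).1 else -1)
      = (if none ∈ cs.map (fun ch => b.get? ch) then (-1 : Int)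
         else (cs.map (fun ch => b.get? ch)).foldl (fun a v => a + v.getD 0) 0
                + (cs.length : Int)) := by
    have hmap : cs.map (fun ch => c.get? ch) = cs.map (fun ch => b.get? ch) :=
      List.map_congr_left (fun ch _ => h ch)
    by_cases hn : none ∈ cs.map (fun ch => b.get? ch)
    · rw [if_pos hn, aScan_break c cs 0 (hmap ▸ hn)]
      rfl
    · rw [if_neg hn, aScan_sum c cs 0 (hmap ▸ hn), hmap]
      simp

theorem answers_eq (c b : PySem.Dict Char Int) (h : ∀ k, c.get? k = b.get? k)
    (targets : List String) (acc : List Int) :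
    targets.foldl
        (fun answer target =>
          let r := aScan c target.toList 0
          if r.2 then answer ++ [r.1] else answer ++ [(-1 : Int)]) acc
      = targets.foldl
          (fun answer t =>
            let vals : List (Option Int) := t.toList.map (fun ch => b.get? ch)
            answer ++ [if none ∈ vals then (-1 : Int)
                       else vals.foldl (fun a v => a + v.getD 0) 0 + (t.toList.length : Int)]) acc := by
  induction targets generalizing acc with
  | nil => rfl
  | cons t rest ih =>
    simp only [List.foldl_cons]
    rw [ih]
    congr 1
    show (if (aScan c t.toList 0).2 = true then acc ++ [(aScan c t.toList 0).1]
          else acc ++ [(-1 : Int)]) = _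
    by_cases hf : (aScan c t.toList 0).2 = true
    · rw [if_pos hf]
      have hs := score_eq c b h t.toList
      rw [if_pos hf] at hs
      exact congrArg (fun x => acc ++ [x]) hs
    · rw [if_neg hf]
      have hs := score_eq c b h t.toList
      rw [if_neg hf] at hs
      exact congrArg (fun x => acc ++ [x]) hs

-- ===== VERDICT (by name: the statement is the Claim_ definition above) =====
theorem solution_spec : Claim_equal_solution := by
  intro keymap targets _
  unfold Spec_solution solution solution_alt
  exact answers_eq _ _ (fun k => (aDict_get? keymap k).trans (bDict_get? keymap k).symm) targets []
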